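-- pv_equiv track=rewrite | github.com/chocoHunter/rtb-mtae | src/common/tool.py | pdf2cdf
-- ===== SOURCE A (Python) =====
-- def pdf2cdf(z_pdf):
--     z_size = len(z_pdf)
--     z_cdf = [0 for _ in range(z_size)]
--     prev_z_cdf = 0
--     for z in range(z_size):
--         z_cdf[z] = z_pdf[z] + prev_z_cdf
--         prev_z_cdf = z_cdf[z]
--     return z_cdf
-- ===== SOURCE B (Python) =====
-- def pdf2cdf(z_pdf):
--     return [sum(z_pdf[:i + 1]) for i in range(len(z_pdf))]
-- ===== Notes on version B (the rewrite author's own statement) =====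
-- stated objective: simpler
-- what changed: Replaces the mutable preallocated array and running accumulator with a one-line comprehension that computes each cumulative value independently as the sum of the prefix slice.
import Mathlib
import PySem

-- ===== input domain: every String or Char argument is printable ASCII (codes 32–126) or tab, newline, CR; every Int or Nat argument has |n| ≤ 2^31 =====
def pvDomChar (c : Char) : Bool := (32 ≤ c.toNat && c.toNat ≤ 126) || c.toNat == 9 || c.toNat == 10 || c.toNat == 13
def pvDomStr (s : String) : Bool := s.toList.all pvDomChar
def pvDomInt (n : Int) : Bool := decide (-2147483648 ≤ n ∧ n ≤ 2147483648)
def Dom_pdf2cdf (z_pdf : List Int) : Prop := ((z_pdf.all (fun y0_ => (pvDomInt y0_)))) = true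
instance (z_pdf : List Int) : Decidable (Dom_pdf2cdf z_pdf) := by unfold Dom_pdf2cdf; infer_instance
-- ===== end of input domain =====

-- B replaces A's preallocated array + running accumulator with a comprehension summing each prefix slice: simpler/plainer, not faster (O(n^2) vs O(n)).


-- ===== PORT A =====
-- z_size = len(z_pdf); z_cdf = [0 for _ in range(z_size)]; prev = 0;
-- for z in range(z_size): z_cdf[z] = z_pdf[z] + prev; prev = z_cdf[z]
def pdf2cdf (z_pdf : List Int) : List Int :=
  let z_size : Int := z_pdf.length
  let z_cdf : List Int := (PySem.List.pyRange 0 z_size 1).map (fun _ => (0 : Int))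
  let st := (PySem.List.pyRange 0 z_size 1).foldl
    (fun (st : List Int × Int) z =>
      let v := PySem.List.pyGetD z_pdf z 0 + st.2   -- index z is always in range here
      (st.1.set z.toNat v, v)) (z_cdf, 0)
  st.1

-- ===== PORT B =====
-- return [sum(z_pdf[:i + 1]) for i in range(len(z_pdf))]
def pdf2cdf_alt (z_pdf : List Int) : List Int :=
  (PySem.List.pyRange 0 (z_pdf.length : Int) 1).map
    (fun i => (PySem.List.slice z_pdf none (some (i + 1))).sum)

-- ===== PRECONDITION & SPEC =====
def Spec_pdf2cdf (z_pdf : List Int) (out : List Int) : Prop := out = pdf2cdf_alt z_pdf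
instance (z_pdf : List Int) (out : List Int) : Decidable (Spec_pdf2cdf z_pdf out) := by unfold Spec_pdf2cdf; infer_instance

-- ===== CLAIM (what is proved, stated in full; the proofs are below) =====
def Claim_equal_pdf2cdf : Prop := ∀ (z_pdf : List Int), Dom_pdf2cdf z_pdf → Spec_pdf2cdf z_pdf (pdf2cdf z_pdf)

-- ===== LEMMAS AND PROOFS =====

-- state after the first k iterations of A's loop
theorem pdf2cdf_loop_inv (xs : List Int) (k : Nat) (hk : k ≤ xs.length) :
    (PySem.List.pyRange 0 (k : Int) 1).foldl
      (fun (st : List Int × Int) z =>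
        let v := PySem.List.pyGetD xs z 0 + st.2
        (st.1.set z.toNat v, v))
      (List.replicate xs.length (0 : Int), 0)
    = ((List.range k).map (fun i => (xs.take (i + 1)).sum) ++ List.replicate (xs.length - k) 0,
       (xs.take k).sum) := by
  induction k with
  | zero =>
      simp [PySem.List.pyRange_one_eq_nil]
  | succ k ih =>
      have hk' : k ≤ xs.length := Nat.le_of_succ_le hk
      have hklt : k < xs.length := hk
      have hcast : ((k + 1 : Nat) : Int) = (k : Int) + 1 := by push_cast; ring
      rw [hcast, PySem.List.pyRange_one_succ_right (by positivity), List.foldl_append,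
        ih hk']
      simp only [List.foldl_cons, List.foldl_nil]
      have hget : PySem.List.pyGetD xs ((k : Nat) : Int) 0 = xs[k] :=
        PySem.List.pyGetD_ofNat xs k 0 hklt
      have hlenP : ((List.range k).map (fun i => (xs.take (i + 1)).sum)).length = k := by
        simp
      have hset :
          (((List.range k).map (fun i => (xs.take (i + 1)).sum) ++
              List.replicate (xs.length - k) (0 : Int)).set k ((xs.take (k + 1)).sum))
          = (List.range (k + 1)).map (fun i => (xs.take (i + 1)).sum) ++
              List.replicate (xs.length - (k + 1)) 0 := by
        rw [List.set_append_right _ _ (by omega)]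
        have hrep : List.replicate (xs.length - k) (0 : Int)
            = 0 :: List.replicate (xs.length - (k + 1)) 0 := by
          have : xs.length - k = (xs.length - (k + 1)) + 1 := by omega
          rw [this, List.replicate_succ]
        rw [hrep, hlenP]
        simp [List.range_succ]
      simp only [hget, Int.toNat_natCast, Prod.mk.injEq]
      constructor
      · rw [show xs[k] + (xs.take k).sum = (xs.take (k + 1)).sum by
          rw [List.sum_take_succ xs k hklt]; ring]
        exact hset
      · rw [List.sum_take_succ xs k hklt]; ring

theorem pdf2cdf_spec : Claim_equal_pdf2cdf := by
  intro xs _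
  unfold Spec_pdf2cdf pdf2cdf pdf2cdf_alt
  have hinit : (PySem.List.pyRange 0 (xs.length : Int) 1).map (fun _ => (0 : Int))
      = List.replicate xs.length 0 := by
    rw [List.map_const']
    simp [PySem.List.length_pyRange_one]
  simp only [hinit]
  rw [pdf2cdf_loop_inv xs xs.length le_rfl]
  simp only [Nat.sub_self, List.replicate_zero, List.append_nil]
  rw [PySem.List.pyRange_one]
  simp only [sub_zero, Int.toNat_natCast, List.map_map]
  apply List.map_congr_left
  intro j hj
  simp only [Function.comp]
  rw [show (0 : Int) + (j : Int) + 1 = ((j + 1 : Nat) : Int) by push_cast; ring,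
    PySem.List.slice_to _ (by positivity)]
  simp
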